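-- pv_equiv track=rewrite | github.com/dayeonkimm/CodingTest_Practice | 프로그래머스/0/181874. A 강조하기/A 강조하기.py | solution
-- ===== SOURCE A (Python) =====
-- def solution(myString):
--     answer = ''
--     for i in myString:
--         if i in ["a","A"]:
--             answer += i.upper()
--         else:
--             answer += i.lower()
--     return answer
-- ===== SOURCE B (Python) =====
-- def solution(myString):
--     return myString.lower().replace('a', 'A')
-- ===== Notes on version B (the rewrite author's own statement) =====
-- stated objective: simpler
-- what changed: Replaces the per-character loop with branch and string accumulator by a closed-form two-pass transform: lowercase the whole string, then substitute the one character the loop uppercases.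
import Mathlib
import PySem

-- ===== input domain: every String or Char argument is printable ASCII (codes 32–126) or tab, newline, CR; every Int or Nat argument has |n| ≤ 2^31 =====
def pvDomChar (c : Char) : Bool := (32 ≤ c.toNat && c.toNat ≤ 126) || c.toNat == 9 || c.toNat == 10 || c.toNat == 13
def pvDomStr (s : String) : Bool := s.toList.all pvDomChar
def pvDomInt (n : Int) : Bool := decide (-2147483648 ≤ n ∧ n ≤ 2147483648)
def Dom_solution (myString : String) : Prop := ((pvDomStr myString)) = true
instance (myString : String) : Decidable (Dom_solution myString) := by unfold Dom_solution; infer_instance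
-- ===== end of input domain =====

-- B replaces A's per-character loop by the closed-form two-pass transform lower-then-replace('a','A'); objective: simpler.

-- ===== PORT A =====
-- Python A: loop over the characters, appending i.upper() for 'a'/'A' and i.lower() otherwise.
def solution (myString : String) : String :=
  String.ofList (myString.toList.foldl
    (fun answer i =>
      answer ++ (if i ∈ ['a', 'A'] then PySem.Chars.upper [i] else PySem.Chars.lower [i]))
    [])

-- ===== PORT B =====
-- Python B: myString.lower().replace('a', 'A')
def solution_alt (myString : String) : String :=
  PySem.Str.replace (PySem.Str.lower myString) "a" "A"

-- ===== PRECONDITION & SPEC =====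
def Spec_solution (myString : String) (out : String) : Prop := out = solution_alt myString
instance (myString : String) (out : String) : Decidable (Spec_solution myString out) := by unfold Spec_solution; infer_instance

-- ===== CLAIM (what is proved, stated in full; the proofs are below) =====
def Claim_equal_solution : Prop := ∀ (myString : String), Dom_solution myString → Spec_solution myString (solution myString)

-- ===== LEMMAS AND PROOFS =====

-- the single-character transform A applies
def pvStep (c : Char) : Char :=
  if c = 'a' ∨ c = 'A' then PySem.Chars.upperChar c else PySem.Chars.lowerChar c

theorem pvFoldA (l : List Char) : ∀ (acc : List Char),
    l.foldl (fun answer i =>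
      answer ++ (if i ∈ ['a', 'A'] then PySem.Chars.upper [i] else PySem.Chars.lower [i])) acc
      = acc ++ l.map pvStep := by
  induction l with
  | nil => intro acc; simp
  | cons c t ih =>
    intro acc
    simp only [List.foldl_cons, List.map_cons, ih]
    by_cases h : c = 'a' ∨ c = 'A' <;>
      simp [pvStep, PySem.Chars.upper, PySem.Chars.lower, h]

-- replace.go with the one-character pattern ['a'] is a pointwise map
theorem pvGo (l : List Char) : ∀ (fuel : Nat) (acc : List Char), l.length ≤ fuel →
    PySem.Chars.replace.go ['a'] ['A'] fuel l acc
      = acc.reverse ++ l.map (fun c => if c = 'a' then 'A' else c) := by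
  induction l with
  | nil =>
    intro fuel acc _
    cases fuel <;> simp [PySem.Chars.replace.go]
  | cons c t ih =>
    intro fuel acc hf
    cases fuel with
    | zero => simp at hf
    | succ n =>
      simp only [PySem.Chars.replace.go]
      by_cases h : c = 'a'
      · subst h
        rw [if_pos (by simp [List.isPrefixOf])]
        rw [show List.drop (['a'].length) ('a' :: t) = t from rfl,
            show (['A'].reverse ++ acc) = 'A' :: acc from rfl]
        rw [ih n ('A' :: acc) (by simpa using hf)]
        simp
      · have hp : List.isPrefixOf ['a'] (c :: t) = false := by
          simp [List.isPrefixOf]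
          exact fun hh => h hh.symm
        simp [hp, h, ih n (c :: acc) (by simpa using hf)]

theorem char_eq_of_toNat (c d : Char) (h : c.toNat = d.toNat) : c = d := by
  have := congrArg Char.ofNat h
  rwa [Char.ofNat_toNat, Char.ofNat_toNat] at this

theorem pvStep_eq (c : Char) :
    (if PySem.Chars.lowerChar c = 'a' then 'A' else PySem.Chars.lowerChar c) = pvStep c := by
  by_cases h : c = 'a' ∨ c = 'A'
  · rcases h with h | h <;> subst h <;> decide
  · push_neg at h
    obtain ⟨h1, h2⟩ := h
    have hne : PySem.Chars.lowerChar c ≠ 'a' := by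
      unfold PySem.Chars.lowerChar PySem.Chars.isupper
      by_cases hu : ('A' ≤ c ∧ c ≤ 'Z')
      · have hb : (decide ('A' ≤ c) && decide (c ≤ 'Z')) = true := by
          simp [hu.1, hu.2]
        rw [if_pos hb]
        intro he
        have hz : c.toNat ≤ 90 := hu.2
        have hn : c.toNat + 32 = 97 := by
          have := congrArg Char.toNat he
          rwa [Char.toNat_ofNat, if_pos (by left; omega)] at this
        have hc : c.toNat = 65 := by omega
        exact h2 (char_eq_of_toNat c 'A' (by rw [hc]; rfl))
      · have hb : (decide ('A' ≤ c) && decide (c ≤ 'Z')) = false := by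
          rcases not_and_or.mp hu with hx | hx <;> simp [hx]
        rw [if_neg (by simp [hb])]
        exact h1
    simp [pvStep, hne, h1, h2]

-- ===== VERDICT (by name: the statement is the Claim_ definition above) =====
theorem solution_spec : Claim_equal_solution := by
  intro s _
  unfold Spec_solution solution solution_alt
  apply String.ext
  rw [PySem.Str.toList_replace]
  have ha : "a".toList = ['a'] := rfl
  have hA : "A".toList = ['A'] := rfl
  simp only [PySem.Str.lower, PySem.Chars.replace, ha, hA, String.toList_ofList]
  rw [if_neg (by simp)]
  rw [pvFoldA, pvGo _ _ _ (by simp [PySem.Chars.lower])]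
  simp [PySem.Chars.lower, pvStep_eq]
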